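-- pv_equiv track=rewrite | github.com/ZosiaZamoyska/algorithms | solutions/advanced/Heap/queue.py | maks_suma_wiekow_with_heap
-- ===== SOURCE A (Python) =====
-- class MaxHeap:
--     def __init__(self):
--         self.t = [None]
--         self.n = 0
--
--     def insert(self, e):
--         self.n += 1
--         self.t.append(e)
--         w = self.n
--         while w > 1 and self.t[w][0] > self.t[w // 2][0]:
--             self.t[w], self.t[w // 2] = self.t[w // 2], self.t[w]
--             w //= 2
--
--     def top(self):
--         return self.t[1] if self.n > 0 else None
--
--     def pop(self):
--         if self.n == 0:
--             return None
--         top_elem = self.t[1]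
--         self.t[1] = self.t[self.n]
--         self.n -= 1
--         self.t.pop()
--         self._restore(1)
--         return top_elem
--
--     def _restore(self, i):
--         lewy = 2 * i
--         prawy = 2 * i + 1
--         maks = i
--
--         if lewy <= self.n and self.t[lewy][0] > self.t[maks][0]:
--             maks = lewy
--         if prawy <= self.n and self.t[prawy][0] > self.t[maks][0]:
--             maks = prawy
--         if maks != i:
--             self.t[i], self.t[maks] = self.t[maks], self.t[i]
--             self._restore(maks)
--
--     def empty(self):
--         return self.n == 0
--
-- def maks_suma_wiekow_with_heap(wiek, k):
--     heap = MaxHeap()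
--     deleted = set()
--     max_sum = 0
--
--     for i in range(len(wiek)):
--         heap.insert((wiek[i], i))
--
--         while not heap.empty() and heap.top()[1] < i - k:
--             outdated = heap.pop()
--
--         if i >= 1:
--             valid = []
--             while not heap.empty() and len(valid) < 2:
--                 val = heap.top()
--                 if val[1] < i - k:
--                     heap.pop()
--                 else:
--                     valid.append(val)
--                     heap.pop()
--
--             if len(valid) == 2:
--                 max_sum = max(max_sum, valid[0][0] + valid[1][0])
--
--             for v in valid:
--                 heap.insert(v)
--
--     return max_sum
-- ===== SOURCE B (Python) =====
-- def maks_suma_wiekow_with_heap(wiek, k):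
--     best = 0
--     for b in range(len(wiek)):
--         lo = b - k
--         if lo < 0:
--             lo = 0
--         for a in range(lo, b):
--             s = wiek[a] + wiek[b]
--             if s > best:
--                 best = s
--     return best
-- ===== Notes on version B (the rewrite author's own statement) =====
-- stated objective: simpler
-- what changed: Replaced the hand-rolled binary max-heap with lazy deletion, per-step double extraction and re-insertion by a direct two-line scan over all index pairs at distance at most k, taking the maximum pair sum.
import Mathlib
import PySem

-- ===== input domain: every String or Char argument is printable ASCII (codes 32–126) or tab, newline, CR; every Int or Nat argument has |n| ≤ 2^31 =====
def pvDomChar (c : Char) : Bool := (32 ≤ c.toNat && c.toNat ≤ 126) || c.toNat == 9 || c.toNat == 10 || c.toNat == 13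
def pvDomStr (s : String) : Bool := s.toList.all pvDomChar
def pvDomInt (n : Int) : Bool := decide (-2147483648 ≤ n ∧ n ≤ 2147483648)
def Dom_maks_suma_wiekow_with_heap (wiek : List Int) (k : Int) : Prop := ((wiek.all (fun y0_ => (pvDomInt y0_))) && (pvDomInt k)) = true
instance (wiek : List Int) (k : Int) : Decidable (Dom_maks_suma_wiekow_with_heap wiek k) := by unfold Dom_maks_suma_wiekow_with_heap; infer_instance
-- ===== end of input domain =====

-- B replaces A's hand-rolled binary max-heap (with lazy deletion and per-step
-- double extraction/re-insertion) by a direct scan over all index pairs at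
-- distance at most k, keeping the maximum pair sum; objective: simpler.

-- ===== PORT A =====
-- Python: `self.t = [None]` — the slot 0 sentinel is never read by the
-- algorithm (all comparisons are at indices ≥ 1), so it is ported as (0, 0).
def pvDefault : Int × Int := (0, 0)

-- Python: `self.t[a], self.t[b] = self.t[b], self.t[a]`
def pySwap (t : List (Int × Int)) (a b : Nat) : List (Int × Int) :=
  (t.set a (t.getD b pvDefault)).set b (t.getD a pvDefault)

-- the `while` loop of MaxHeap.insert (sift the element at index w up)
def siftUp (t : List (Int × Int)) (w : Nat) : List (Int × Int) :=
  if h : 1 < w ∧ (t.getD w pvDefault).1 > (t.getD (w / 2) pvDefault).1 then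
    siftUp (pySwap t w (w / 2)) (w / 2)
  else t
termination_by w
decreasing_by omega

-- the index `maks` computed by one round of MaxHeap._restore
def pyMaks (t : List (Int × Int)) (n i : Nat) : Nat :=
  let lewy := 2 * i
  let prawy := 2 * i + 1
  let m1 := if lewy ≤ n ∧ (t.getD lewy pvDefault).1 > (t.getD i pvDefault).1 then lewy else i
  if prawy ≤ n ∧ (t.getD prawy pvDefault).1 > (t.getD m1 pvDefault).1 then prawy else m1

theorem pyMaks_gt (t : List (Int × Int)) (n i : Nat) (hne : pyMaks t n i ≠ i) :
    i < pyMaks t n i ∧ pyMaks t n i ≤ n := by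
  simp only [pyMaks] at hne ⊢
  split_ifs at hne ⊢ <;> omega

-- MaxHeap._restore (sift the element at index i down; n = current heap size)
def pyRestore (t : List (Int × Int)) (n : Nat) (i : Nat) : List (Int × Int) :=
  let maks := pyMaks t n i
  if hne : maks ≠ i then pyRestore (pySwap t i maks) n maks else t
termination_by n + 1 - i
decreasing_by
  simp only [maks] at hne
  have := pyMaks_gt t n i hne
  omega

structure PyHeap where
  t : List (Int × Int)
  n : Nat
deriving Repr, DecidableEq

def heapInsert (h : PyHeap) (e : Int × Int) : PyHeap :=
  ⟨siftUp (h.t ++ [e]) (h.n + 1), h.n + 1⟩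

-- MaxHeap.pop as a state transformer (Python mutates in place; the popped
-- element is h.t[1], read separately where A's loop reads `heap.top()`)
def heapPopState (h : PyHeap) : PyHeap :=
  if h.n = 0 then h
  else ⟨pyRestore ((h.t.set 1 (h.t.getD h.n pvDefault)).dropLast) (h.n - 1) 1, h.n - 1⟩

theorem heapPopState_n_lt (h : PyHeap) (hn : h.n ≠ 0) : (heapPopState h).n < h.n := by
  simp only [heapPopState, if_neg hn]; omega

-- `while not heap.empty() and heap.top()[1] < i - k: heap.pop()`
def pyPurge (h : PyHeap) (bound : Int) : PyHeap :=
  if hg : h.n ≠ 0 ∧ (h.t.getD 1 pvDefault).2 < bound then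
    pyPurge (heapPopState h) bound
  else h
termination_by h.n
decreasing_by exact heapPopState_n_lt h hg.1

-- the `while not heap.empty() and len(valid) < 2: …` loop of A
def pyExtract (h : PyHeap) (bound : Int) (valid : List (Int × Int)) :
    List (Int × Int) × PyHeap :=
  if hg : h.n ≠ 0 ∧ valid.length < 2 then
    let val := h.t.getD 1 pvDefault
    if val.2 < bound then pyExtract (heapPopState h) bound valid
    else pyExtract (heapPopState h) bound (valid ++ [val])
  else (valid, h)
termination_by h.n
decreasing_by all_goals exact heapPopState_n_lt h hg.1

def maks_suma_wiekow_with_heap (wiek : List Int) (k : Int) : Int :=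
  ((List.range wiek.length).foldl (fun st i =>
    let h1 := heapInsert st.1 (wiek.getD i 0, (i : Int))
    let h2 := pyPurge h1 ((i : Int) - k)
    if 1 ≤ i then
      let ex := pyExtract h2 ((i : Int) - k) []
      let ms := if ex.1.length = 2 then
          max st.2 ((ex.1.getD 0 pvDefault).1 + (ex.1.getD 1 pvDefault).1)
        else st.2
      (ex.1.foldl (fun h v => heapInsert h v) ex.2, ms)
    else (h2, st.2)) (⟨[pvDefault], 0⟩, 0)).2

-- ===== PORT B =====
-- `wiek[a]`/`wiek[b]` are indexed with values of range(...), always in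
-- [0, len wiek), so List.getD is exact here.
def maks_suma_wiekow_with_heap_alt (wiek : List Int) (k : Int) : Int :=
  (List.range wiek.length).foldl (fun (best : Int) (b : Nat) =>
    (PySem.List.pyRange (max 0 ((b : Int) - k)) (b : Int) 1).foldl (fun (best : Int) (a : Int) =>
      let s := wiek.getD a.toNat 0 + wiek.getD b 0
      if s > best then s else best) best) 0

-- ===== PRECONDITION & SPEC =====
def Spec_maks_suma_wiekow_with_heap (wiek : List Int) (k : Int) (out : Int) : Prop := out = maks_suma_wiekow_with_heap_alt wiek k
instance (wiek : List Int) (k : Int) (out : Int) : Decidable (Spec_maks_suma_wiekow_with_heap wiek k out) := by unfold Spec_maks_suma_wiekow_with_heap; infer_instance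

-- ===== CLAIM (what is proved, stated in full; the proofs are below) =====
def Claim_equal_maks_suma_wiekow_with_heap : Prop := ∀ (wiek : List Int) (k : Int), Dom_maks_suma_wiekow_with_heap wiek k → Spec_maks_suma_wiekow_with_heap wiek k (maks_suma_wiekow_with_heap wiek k)

-- ===== LEMMAS AND PROOFS =====

-- ---------- generic list helpers ----------

theorem pvGetD_set_eq {α : Type} (t : List α) (i : Nat) (x d : α) (h : i < t.length) :
    (t.set i x).getD i d = x := by
  simp [List.getD_eq_getElem?_getD, List.getElem?_set_self h]

theorem pvGetD_set_ne {α : Type} (t : List α) (i j : Nat) (x d : α) (h : i ≠ j) :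
    (t.set i x).getD j d = t.getD j d := by
  simp [List.getD_eq_getElem?_getD, List.getElem?_set_ne h]

theorem pvSet_set_perm {α : Type} [DecidableEq α] (l : List α) (a b : Nat) (d : α)
    (ha : a < l.length) (hb : b < l.length) :
    ((l.set a (l.getD b d)).set b (l.getD a d)).Perm l := by
  by_cases hab : a = b
  · subst hab
    rw [List.getD_eq_getElem l d ha, List.set_getElem_self, List.set_getElem_self]
  · rw [List.getD_eq_getElem l d ha, List.getD_eq_getElem l d hb, List.perm_iff_count]
    intro x
    have hb' : b < (l.set a l[b]).length := by simpa using hb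
    rw [List.count_set hb', List.count_set ha]
    rw [List.getElem_set_ne hab hb']
    have h1 : l[a] = x → 0 < List.count x l := by
      intro h; exact List.count_pos_iff.2 (h ▸ List.getElem_mem ha)
    have h2 : l[b] = x → 0 < List.count x l := by
      intro h; exact List.count_pos_iff.2 (h ▸ List.getElem_mem hb)
    have key : ∀ c1 c2 : Bool, (l[a] == x) = c1 → (l[b] == x) = c2 →
        (List.count x l - (if (l[a] == x) = true then 1 else 0) +
            (if (l[b] == x) = true then 1 else 0) -
            (if (l[b] == x) = true then 1 else 0) +
            (if (l[a] == x) = true then 1 else 0)) = List.count x l := by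
      intro c1 c2 hc1 hc2
      cases c1 <;> cases c2 <;> simp only [hc1, hc2, if_true, if_false] <;>
        simp only [Nat.add_sub_cancel] <;>
        first
          | rfl
          | (have := h2 (by simpa using hc2); omega)
          | (have := h1 (by simpa using hc1); omega)
    exact key _ _ rfl rfl

theorem pvPySwap_length (t : List (Int × Int)) (a b : Nat) :
    (pySwap t a b).length = t.length := by simp [pySwap]

theorem pvGetD_pySwap_left (t : List (Int × Int)) (a b : Nat)
    (ha : a < t.length) (hb : b < t.length) :
    (pySwap t a b).getD a pvDefault = t.getD b pvDefault := by
  by_cases hab : a = b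
  · subst hab
    unfold pySwap
    exact pvGetD_set_eq _ _ _ _ (by simpa using ha)
  · unfold pySwap
    rw [pvGetD_set_ne _ _ _ _ _ (Ne.symm hab), pvGetD_set_eq _ _ _ _ ha]

theorem pvGetD_pySwap_right (t : List (Int × Int)) (a b : Nat) (hb : b < t.length) :
    (pySwap t a b).getD b pvDefault = t.getD a pvDefault := by
  unfold pySwap
  exact pvGetD_set_eq _ _ _ _ (by simpa using hb)

theorem pvGetD_pySwap_other (t : List (Int × Int)) (a b j : Nat) (hja : j ≠ a) (hjb : j ≠ b) :
    (pySwap t a b).getD j pvDefault = t.getD j pvDefault := by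
  unfold pySwap
  rw [pvGetD_set_ne _ _ _ _ _ (Ne.symm hjb), pvGetD_set_ne _ _ _ _ _ (Ne.symm hja)]

theorem pvDrop_one_set {α : Type} (l : List α) (i : Nat) (x : α) (hi : 1 ≤ i) :
    (l.set i x).drop 1 = (l.drop 1).set (i - 1) x := by
  rw [List.drop_set]
  simp [Nat.not_lt.mpr hi]

theorem pvGetD_drop_one {α : Type} (l : List α) (i : Nat) (d : α) (hi : 1 ≤ i) :
    (l.drop 1).getD (i - 1) d = l.getD i d := by
  rw [List.getD_eq_getElem?_getD, List.getD_eq_getElem?_getD, List.getElem?_drop]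
  congr 2
  omega

theorem pvPySwap_drop_perm (t : List (Int × Int)) (a b : Nat)
    (ha1 : 1 ≤ a) (hb1 : 1 ≤ b) (ha : a < t.length) (hb : b < t.length) :
    ((pySwap t a b).drop 1).Perm (t.drop 1) := by
  unfold pySwap
  rw [pvDrop_one_set _ _ _ hb1, pvDrop_one_set _ _ _ ha1,
    ← pvGetD_drop_one t b pvDefault hb1, ← pvGetD_drop_one t a pvDefault ha1]
  exact pvSet_set_perm (t.drop 1) (a - 1) (b - 1) pvDefault
    (by simp only [List.length_drop]; omega) (by simp only [List.length_drop]; omega)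

-- ---------- the heap invariant ----------

-- the max-heap property of t[1..n] (each child's value is at most its parent's)
def pvHP (t : List (Int × Int)) (n : Nat) : Prop :=
  ∀ j, 2 ≤ j → j ≤ n → (t.getD j pvDefault).1 ≤ (t.getD (j / 2) pvDefault).1

theorem pvSiftUp_length (t : List (Int × Int)) (w : Nat) :
    (siftUp t w).length = t.length := by
  induction t, w using siftUp.induct with
  | case1 t w h ih => rw [siftUp, dif_pos h, ih, pvPySwap_length]
  | case2 t w h => rw [siftUp, dif_neg h]

theorem pvSiftUp_drop_perm (t : List (Int × Int)) (w : Nat) :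
    1 ≤ w → w < t.length → ((siftUp t w).drop 1).Perm (t.drop 1) := by
  induction t, w using siftUp.induct with
  | case1 t w h ih =>
    intro hw1 hwl
    rw [siftUp, dif_pos h]
    have h2 : w / 2 < (pySwap t w (w / 2)).length := by rw [pvPySwap_length]; omega
    exact (ih (by omega) h2).trans
      (pvPySwap_drop_perm t w (w / 2) (by omega) (by omega) hwl (by omega))
  | case2 t w h => intro _ _; rw [siftUp, dif_neg h]

theorem pvSiftUp_heap (t : List (Int × Int)) (w n : Nat) :
    t.length = n + 1 → 1 ≤ w → w ≤ n →
    (∀ j, 2 ≤ j → j ≤ n → j ≠ w →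
      (t.getD j pvDefault).1 ≤ (t.getD (j / 2) pvDefault).1) →
    (∀ c, 2 ≤ c → c ≤ n → c / 2 = w → 2 ≤ w →
      (t.getD c pvDefault).1 ≤ (t.getD (w / 2) pvDefault).1) →
    pvHP (siftUp t w) n := by
  induction t, w using siftUp.induct with
  | case1 t w h ih =>
    intro hlen hw1 hwn hA hB
    rw [siftUp, dif_pos h]
    obtain ⟨hw2, hgt⟩ := h
    have hwl : w < t.length := by omega
    have hpl : w / 2 < t.length := by omega
    have gl : (pySwap t w (w / 2)).getD w pvDefault = t.getD (w / 2) pvDefault :=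
      pvGetD_pySwap_left t w (w / 2) hwl hpl
    have gr : (pySwap t w (w / 2)).getD (w / 2) pvDefault = t.getD w pvDefault :=
      pvGetD_pySwap_right t w (w / 2) hpl
    have go : ∀ j, j ≠ w → j ≠ w / 2 →
        (pySwap t w (w / 2)).getD j pvDefault = t.getD j pvDefault :=
      fun j h1 h2 => pvGetD_pySwap_other t w (w / 2) j h1 h2
    apply ih (by rw [pvPySwap_length]; exact hlen) (by omega) (by omega)
    · -- upward-violation-at-w/2 form of the heap property for the swapped array
      intro j hj2 hjn hjne
      by_cases hjw : j = w
      · subst hjw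
        rw [gl, gr]
        omega
      · by_cases hjq : j / 2 = w
        · have hjp : j ≠ w / 2 := by omega
          rw [go j hjw hjp, hjq, gl]
          exact hB j hj2 hjn hjq (by omega)
        · by_cases hjq2 : j / 2 = w / 2
          · have hjp : j ≠ w / 2 := by omega
            rw [go j hjw hjp, hjq2, gr]
            have h1 : (t.getD j pvDefault).1 ≤ (t.getD (j / 2) pvDefault).1 :=
              hA j hj2 hjn hjw
            rw [hjq2] at h1
            omega
          · have hjp : j ≠ w / 2 := by omega
            rw [go j hjw hjp, go (j / 2) hjq hjq2]
            exact hA j hj2 hjn hjw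
    · intro c hc2 hcn hcq hp2
      have hqq : w / 2 / 2 ≠ w := by omega
      have hqq2 : w / 2 / 2 ≠ w / 2 := by omega
      rw [go (w / 2 / 2) hqq hqq2]
      by_cases hcw : c = w
      · rw [hcw, gl]
        exact hA (w / 2) hp2 (by omega) (by omega)
      · have hcp : c ≠ w / 2 := by omega
        rw [go c hcw hcp]
        have h1 : (t.getD c pvDefault).1 ≤ (t.getD (c / 2) pvDefault).1 :=
          hA c hc2 hcn hcw
        rw [hcq] at h1
        exact le_trans h1 (hA (w / 2) hp2 (by omega) (by omega))
  | case2 t w h =>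
    intro hlen hw1 hwn hA hB
    rw [siftUp, dif_neg h]
    intro j hj2 hjn
    by_cases hjw : j = w
    · subst hjw
      rcases not_and_or.1 h with h1 | h1
      · omega
      · omega
    · exact hA j hj2 hjn hjw

theorem pvHP_le_root (t : List (Int × Int)) (n : Nat) (hp : pvHP t n) :
    ∀ j, 1 ≤ j → j ≤ n → (t.getD j pvDefault).1 ≤ (t.getD 1 pvDefault).1 := by
  intro j
  induction j using Nat.strong_induction_on with
  | _ j ih =>
    intro hj1 hjn
    by_cases hj : j = 1
    · subst hj; exact le_refl _
    · exact le_trans (hp j (by omega) hjn) (ih (j / 2) (by omega) (by omega) (by omega))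

-- ---------- pyMaks / pyRestore ----------

theorem pvPyMaks_spec (t : List (Int × Int)) (n i : Nat) :
    (pyMaks t n i = i ∧
      (2 * i ≤ n → (t.getD (2 * i) pvDefault).1 ≤ (t.getD i pvDefault).1) ∧
      (2 * i + 1 ≤ n → (t.getD (2 * i + 1) pvDefault).1 ≤ (t.getD i pvDefault).1)) ∨
    (pyMaks t n i ≤ n ∧ i < pyMaks t n i ∧ pyMaks t n i / 2 = i ∧
      (t.getD i pvDefault).1 < (t.getD (pyMaks t n i) pvDefault).1 ∧
      (2 * i ≤ n → (t.getD (2 * i) pvDefault).1 ≤ (t.getD (pyMaks t n i) pvDefault).1) ∧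
      (2 * i + 1 ≤ n → (t.getD (2 * i + 1) pvDefault).1 ≤ (t.getD (pyMaks t n i) pvDefault).1)) := by
  have hi0 : i = 0 → ¬ ((t.getD (2 * i) pvDefault).1 > (t.getD i pvDefault).1) := by
    intro hi; subst hi; simp
  simp only [pyMaks]
  split_ifs with h1 h2 h2
  · -- left child beats i, right child beats left child: maks = 2*i+1
    right
    refine ⟨h2.1, by omega, by omega, lt_trans h1.2 h2.2, fun _ => le_of_lt h2.2, fun _ => le_refl _⟩
  · -- left child beats i, right child does not beat it: maks = 2*i
    right
    have hi : 1 ≤ i := by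
      rcases Nat.eq_zero_or_pos i with h | h
      · exact absurd h1.2 (hi0 h)
      · exact h
    refine ⟨h1.1, by omega, by omega, h1.2, fun _ => le_refl _, fun hpn => ?_⟩
    rcases not_and_or.1 h2 with h | h
    · omega
    · exact not_lt.1 h
  · -- left child does not beat i, right child beats i: maks = 2*i+1
    right
    refine ⟨h2.1, by omega, by omega, h2.2, fun hln => ?_, fun _ => le_refl _⟩
    rcases not_and_or.1 h1 with h | h
    · omega
    · exact le_of_lt (lt_of_le_of_lt (not_lt.1 h) h2.2)
  · -- maks = i
    left
    refine ⟨rfl, fun hln => ?_, fun hpn => ?_⟩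
    · rcases not_and_or.1 h1 with h | h
      · omega
      · exact not_lt.1 h
    · rcases not_and_or.1 h2 with h | h
      · omega
      · exact not_lt.1 h

theorem pvRestore_length (t : List (Int × Int)) (n i : Nat) :
    (pyRestore t n i).length = t.length := by
  refine pyRestore.induct n (motive := fun t i => (pyRestore t n i).length = t.length)
    ?_ ?_ t i
  · intro t i maks hne ih
    replace hne : pyMaks t n i ≠ i := hne
    rw [pyRestore.eq_def]
    simp only [dif_pos hne]
    simp only [maks] at ih
    rw [ih, pvPySwap_length]
  · intro t i maks hne
    replace hne : ¬ pyMaks t n i ≠ i := hne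
    rw [pyRestore.eq_def]
    simp only [dif_neg hne]

theorem pvRestore_drop_perm (t : List (Int × Int)) (n i : Nat) :
    t.length = n + 1 → 1 ≤ i → ((pyRestore t n i).drop 1).Perm (t.drop 1) := by
  refine pyRestore.induct n
    (motive := fun t i => t.length = n + 1 → 1 ≤ i → ((pyRestore t n i).drop 1).Perm (t.drop 1))
    ?_ ?_ t i
  · intro t i maks hne ih
    intro hlen hi
    simp only [maks] at ih
    replace hne : pyMaks t n i ≠ i := hne
    have hgt := pyMaks_gt t n i hne
    rw [pyRestore.eq_def]
    simp only [dif_pos hne]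
    refine (ih (by rw [pvPySwap_length]; exact hlen) (by omega)).trans ?_
    exact pvPySwap_drop_perm t i (pyMaks t n i) hi (by omega) (by omega) (by omega)
  · intro t i maks hne
    intro _ _
    replace hne : ¬ pyMaks t n i ≠ i := hne
    rw [pyRestore.eq_def]
    simp only [dif_neg hne]
    exact List.Perm.refl _

theorem pvRestore_heap (t : List (Int × Int)) (n i : Nat) :
    t.length = n + 1 → 1 ≤ i →
    (∀ j, 2 ≤ j → j ≤ n → j / 2 ≠ i →
      (t.getD j pvDefault).1 ≤ (t.getD (j / 2) pvDefault).1) →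
    (∀ c, c ≤ n → c / 2 = i → 2 ≤ i →
      (t.getD c pvDefault).1 ≤ (t.getD (i / 2) pvDefault).1) →
    pvHP (pyRestore t n i) n := by
  refine pyRestore.induct n (motive := fun t i =>
      t.length = n + 1 → 1 ≤ i →
      (∀ j, 2 ≤ j → j ≤ n → j / 2 ≠ i →
        (t.getD j pvDefault).1 ≤ (t.getD (j / 2) pvDefault).1) →
      (∀ c, c ≤ n → c / 2 = i → 2 ≤ i →
        (t.getD c pvDefault).1 ≤ (t.getD (i / 2) pvDefault).1) →
      pvHP (pyRestore t n i) n) ?_ ?_ t i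
  · intro t i maks hne ih
    intro hlen hi hA hB
    simp only [maks] at ih
    replace hne : pyMaks t n i ≠ i := hne
    rcases pvPyMaks_spec t n i with hspec | hspec
    · exact absurd hspec.1 hne
    obtain ⟨hMn, hMi, hM2, hMgt, hFl, hFr⟩ := hspec
    rw [pyRestore.eq_def]
    simp only [dif_pos hne]
    set M := pyMaks t n i with hMdef
    have hil : i < t.length := by omega
    have hMl : M < t.length := by omega
    have gl : (pySwap t i M).getD i pvDefault = t.getD M pvDefault :=
      pvGetD_pySwap_left t i M hil hMl
    have gr : (pySwap t i M).getD M pvDefault = t.getD i pvDefault :=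
      pvGetD_pySwap_right t i M hMl
    have go : ∀ j, j ≠ i → j ≠ M →
        (pySwap t i M).getD j pvDefault = t.getD j pvDefault :=
      fun j ha hb => pvGetD_pySwap_other t i M j ha hb
    have hM2i : M = 2 * i ∨ M = 2 * i + 1 := by omega
    apply ih (by rw [pvPySwap_length]; exact hlen) (by omega)
    · intro j hj2 hjn hjq
      by_cases hjM : j = M
      · subst hjM
        rw [gr, hM2, gl]
        exact le_of_lt hMgt
      · by_cases hji : j = i
        · have hi2 : 2 ≤ i := by omega
          have hq1 : i / 2 ≠ i := by omega
          have hq2 : i / 2 ≠ M := by omega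
          rw [hji, gl, go (i / 2) hq1 hq2]
          exact hB M hMn hM2 hi2
        · by_cases hjq2 : j / 2 = i
          · rw [go j hji hjM, hjq2, gl]
            have hj' : j = 2 * i ∨ j = 2 * i + 1 := by omega
            rcases hj' with hj | hj <;> rw [hj] at hjn ⊢
            · exact hFl hjn
            · exact hFr hjn
          · have hq2 : j / 2 ≠ M := hjq
            have hq1 : j / 2 ≠ i := hjq2
            rw [go j hji hjM, go (j / 2) hq1 hq2]
            exact hA j hj2 hjn hjq2
    · intro c hcn hcq hM2'
      have hc2M : 2 * M ≤ c := by omega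
      have hci : c ≠ i := by omega
      have hcM : c ≠ M := by omega
      rw [hM2, gl, go c hci hcM]
      have h1 : (t.getD c pvDefault).1 ≤ (t.getD (c / 2) pvDefault).1 :=
        hA c (by omega) hcn (by omega)
      rw [hcq] at h1
      exact h1
  · intro t i maks hne
    intro hlen hi hA hB
    replace hne : ¬ pyMaks t n i ≠ i := hne
    rw [pyRestore.eq_def]
    simp only [dif_neg hne]
    rcases pvPyMaks_spec t n i with hspec | hspec
    · obtain ⟨-, hFl, hFr⟩ := hspec
      intro j hj2 hjn
      by_cases hjq : j / 2 = i
      · have : j = 2 * i ∨ j = 2 * i + 1 := by omega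
        rcases this with hj | hj <;> rw [hjq] <;> rw [hj] at hjn ⊢
        · exact hFl hjn
        · exact hFr hjn
      · exact hA j hj2 hjn hjq
    · exact absurd (by omega : pyMaks t n i ≠ i) (not_not.2 (not_not.1 hne))

-- ---------- heap-level specifications ----------

-- the elements the Python heap currently holds (t[1..n])
def pvContent (h : PyHeap) : List (Int × Int) := h.t.drop 1

-- the representation invariant of MaxHeap
def pvWF (h : PyHeap) : Prop := h.t.length = h.n + 1 ∧ pvHP h.t h.n

theorem pvContent_length (h : PyHeap) (hw : pvWF h) : (pvContent h).length = h.n := by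
  simp [pvContent, hw.1]

theorem pvContent_nil (h : PyHeap) (hw : pvWF h) (hn : h.n = 0) : pvContent h = [] := by
  have := pvContent_length h hw
  rw [hn] at this
  exact List.eq_nil_of_length_eq_zero this

theorem pvInsert_WF (h : PyHeap) (e : Int × Int) (hw : pvWF h) : pvWF (heapInsert h e) := by
  obtain ⟨hlen, hhp⟩ := hw
  constructor
  · show (siftUp (h.t ++ [e]) (h.n + 1)).length = h.n + 1 + 1
    rw [pvSiftUp_length]
    simp [hlen]
  · show pvHP (siftUp (h.t ++ [e]) (h.n + 1)) (h.n + 1)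
    apply pvSiftUp_heap (h.t ++ [e]) (h.n + 1) (h.n + 1) (by simp [hlen]) (by omega) (le_refl _)
    · intro j hj2 hjn hjne
      have hj : j < h.t.length := by omega
      have hjq : j / 2 < h.t.length := by omega
      rw [List.getD_append _ _ _ _ hj, List.getD_append _ _ _ _ hjq]
      exact hhp j hj2 (by omega)
    · intro c hc2 hcn hcq _
      omega
  
theorem pvInsert_content (h : PyHeap) (e : Int × Int) (hw : pvWF h) :
    (pvContent (heapInsert h e)).Perm (pvContent h ++ [e]) := by
  have h1 : (pvContent (heapInsert h e)).Perm ((h.t ++ [e]).drop 1) := by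
    apply pvSiftUp_drop_perm (h.t ++ [e]) (h.n + 1) (by omega)
    simp [hw.1]
  rw [List.drop_append_of_le_length (by have := hw.1; omega)] at h1
  exact h1

theorem pvRoot_max (h : PyHeap) (hw : pvWF h) (x : Int × Int) (hx : x ∈ pvContent h) :
    x.1 ≤ (h.t.getD 1 pvDefault).1 := by
  obtain ⟨j, hjl, hj⟩ := List.mem_iff_getElem.1 hx
  have hlen := hw.1
  have hjlen : (pvContent h).length = h.n := pvContent_length h hw
  have hjn : j < h.n := by rwa [hjlen] at hjl
  have h1j : j + 1 < h.t.length := by omega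
  have hx' : x = h.t.getD (j + 1) pvDefault := by
    rw [List.getD_eq_getElem _ _ h1j, ← hj]
    simp [pvContent]
  rw [hx']
  exact pvHP_le_root h.t h.n hw.2 (j + 1) (by omega) (by omega)

theorem pvGetD_dropLast {α : Type} (l : List α) (j : Nat) (d : α) (hj : j < l.length - 1) :
    l.dropLast.getD j d = l.getD j d := by
  rw [List.getD_eq_getElem?_getD, List.getD_eq_getElem?_getD, List.getElem?_dropLast,
    if_pos hj]

theorem pvTail_perm {α : Type} (u : List α) (d : α) (hu : u ≠ []) :
    u.Perm (u.getD 0 d :: (u.set 0 (u.getD (u.length - 1) d)).dropLast) := by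
  cases u with
  | nil => exact absurd rfl hu
  | cons x r =>
    cases hr : r with
    | nil => exact List.Perm.refl _
    | cons y s =>
      have hrne : r ≠ [] := by rw [hr]; simp
      rw [← hr]
      have hrpos : 0 < r.length := List.length_pos_of_ne_nil hrne
      have hlast : (x :: r).getD ((x :: r).length - 1) d = r.getLast hrne := by
        have hidx : (x :: r).length - 1 = (r.length - 1) + 1 := by
          simp only [List.length_cons]
          omega
        rw [hidx, List.getD_cons_succ, List.getLast_eq_getElem,
          List.getD_eq_getElem _ _ (by omega)]
      rw [hlast]
      show (x :: r).Perm (x :: (r.getLast hrne :: r).dropLast)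
      rw [List.dropLast_cons_of_ne_nil hrne]
      refine List.Perm.cons x ?_
      conv_lhs => rw [← List.dropLast_append_getLast hrne]
      exact List.perm_append_singleton _ _

theorem pvPop_spec (h : PyHeap) (hw : pvWF h) (hn : h.n ≠ 0) :
    pvWF (heapPopState h) ∧ (heapPopState h).n = h.n - 1 ∧
    (pvContent h).Perm (h.t.getD 1 pvDefault :: pvContent (heapPopState h)) := by
  obtain ⟨hlen, hhp⟩ := hw
  have hset : (h.t.set 1 (h.t.getD h.n pvDefault)).length = h.n + 1 := by simp [hlen]
  have ht2len : ((h.t.set 1 (h.t.getD h.n pvDefault)).dropLast).length = h.n := by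
    rw [List.length_dropLast, hset]
    omega
  simp only [heapPopState, if_neg hn]
  refine ⟨⟨?_, ?_⟩, ?_, ?_⟩
  · show (pyRestore ((h.t.set 1 (h.t.getD h.n pvDefault)).dropLast) (h.n - 1) 1).length =
      (h.n - 1) + 1
    rw [pvRestore_length, ht2len]
    omega
  · apply pvRestore_heap _ _ _ (by rw [ht2len]; omega) (le_refl 1)
    · intro j hj2 hjn hjq
      have hj4 : 4 ≤ j := by omega
      have g1 : ((h.t.set 1 (h.t.getD h.n pvDefault)).dropLast).getD j pvDefault =
          h.t.getD j pvDefault := by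
        rw [pvGetD_dropLast _ _ _ (by rw [hset]; omega),
          pvGetD_set_ne _ _ _ _ _ (by omega : (1 : Nat) ≠ j)]
      have g2 : ((h.t.set 1 (h.t.getD h.n pvDefault)).dropLast).getD (j / 2) pvDefault =
          h.t.getD (j / 2) pvDefault := by
        rw [pvGetD_dropLast _ _ _ (by rw [hset]; omega),
          pvGetD_set_ne _ _ _ _ _ (by omega : (1 : Nat) ≠ j / 2)]
      rw [g1, g2]
      exact hhp j hj2 (by omega)
    · intro c hcn hcq hc2
      omega
  · trivial
  · -- multiset bookkeeping: the root leaves, the rest stays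
    have hperm1 : ((pyRestore ((h.t.set 1 (h.t.getD h.n pvDefault)).dropLast) (h.n - 1) 1).drop
        1).Perm (((h.t.set 1 (h.t.getD h.n pvDefault)).dropLast).drop 1) :=
      pvRestore_drop_perm _ _ _ (by rw [ht2len]; omega) (le_refl 1)
    have hcomm : ((h.t.set 1 (h.t.getD h.n pvDefault)).dropLast).drop 1 =
        ((h.t.drop 1).set 0 (h.t.getD h.n pvDefault)).dropLast := by
      rw [List.dropLast_eq_take, List.dropLast_eq_take, List.drop_take,
        pvDrop_one_set _ _ _ (le_refl 1)]
      congr 1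
      simp [hset, hlen]
    have hu : (h.t.drop 1) ≠ [] := by
      intro hnil
      have h2 : (h.t.drop 1).length = h.n := by simp [hlen]
      rw [hnil] at h2
      simp at h2
      omega
    have hval : (h.t.drop 1).getD ((h.t.drop 1).length - 1) pvDefault =
        h.t.getD h.n pvDefault := by
      have h2 : (h.t.drop 1).length - 1 = h.n - 1 := by simp [hlen]
      rw [h2]
      have h3 := pvGetD_drop_one h.t h.n pvDefault (by omega)
      rwa [(by omega : h.n - 1 = h.n - 1)] at h3
    have hroot : h.t.getD 1 pvDefault = (h.t.drop 1).getD 0 pvDefault := by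
      have h4 := pvGetD_drop_one h.t 1 pvDefault (le_refl 1)
      simpa using h4.symm
    show (h.t.drop 1).Perm (h.t.getD 1 pvDefault :: _)
    refine List.Perm.trans ?_ (List.Perm.cons _ hperm1.symm)
    rw [hcomm, hroot, ← hval]
    exact pvTail_perm (h.t.drop 1) pvDefault hu

-- ---------- purge, extraction, re-insertion ----------

-- the multiset of currently-valid elements (index ≥ bound) of a list
def pvMF (bound : Int) (l : List (Int × Int)) : Multiset (Int × Int) :=
  Multiset.filter (fun x => bound ≤ x.2) ↑l

theorem pvMF_perm (bound : Int) (l l' : List (Int × Int)) (hp : l.Perm l') :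
    pvMF bound l = pvMF bound l' := by
  unfold pvMF
  rw [Multiset.coe_eq_coe.2 hp]

theorem pvPurge_spec (h : PyHeap) (bound : Int) : pvWF h →
    pvWF (pyPurge h bound) ∧
    pvMF bound (pvContent (pyPurge h bound)) = pvMF bound (pvContent h) := by
  refine pyPurge.induct bound (motive := fun h => pvWF h →
    pvWF (pyPurge h bound) ∧
    pvMF bound (pvContent (pyPurge h bound)) = pvMF bound (pvContent h)) ?_ ?_ h
  · intro h hg ih hw
    obtain ⟨hw', hn', hperm⟩ := pvPop_spec h hw hg.1
    rw [pyPurge.eq_def]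
    simp only [dif_pos hg]
    obtain ⟨hw2, heq⟩ := ih hw'
    refine ⟨hw2, ?_⟩
    rw [heq, pvMF_perm bound _ _ hperm]
    unfold pvMF
    rw [← Multiset.cons_coe, Multiset.filter_cons_of_neg _ (by exact not_le.2 hg.2)]
  · intro h hg hw
    rw [pyPurge.eq_def]
    simp only [dif_neg hg]
    exact ⟨hw, trivial⟩

-- `extra` is a greedy maximum selection from W (each element a maximum of
-- what remains)
def GreedyMax (W : Multiset (Int × Int)) : List (Int × Int) → Prop
  | [] => True
  | a :: r => a ∈ W ∧ (∀ x ∈ W, x.1 ≤ a.1) ∧ GreedyMax (W.erase a) r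

theorem pvExtract_spec (h : PyHeap) (bound : Int) (valid : List (Int × Int)) :
    pvWF h → valid.length ≤ 2 →
    ∃ extra,
      (pyExtract h bound valid).1 = valid ++ extra ∧
      pvWF (pyExtract h bound valid).2 ∧
      pvMF bound (pvContent h) = ↑extra + pvMF bound (pvContent (pyExtract h bound valid).2) ∧
      GreedyMax (pvMF bound (pvContent h)) extra ∧
      (valid ++ extra).length = min 2 (valid.length + Multiset.card (pvMF bound (pvContent h))) := by
  refine pyExtract.induct bound (motive := fun h valid => pvWF h → valid.length ≤ 2 →
    ∃ extra,
      (pyExtract h bound valid).1 = valid ++ extra ∧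
      pvWF (pyExtract h bound valid).2 ∧
      pvMF bound (pvContent h) = ↑extra + pvMF bound (pvContent (pyExtract h bound valid).2) ∧
      GreedyMax (pvMF bound (pvContent h)) extra ∧
      (valid ++ extra).length = min 2 (valid.length + Multiset.card (pvMF bound (pvContent h))))
    ?_ ?_ ?_ h valid
  · -- invalid root: popped and dropped
    intro h valid hg val hlt ih hw hv2
    simp only [val] at hlt ih
    obtain ⟨hw', hn', hperm⟩ := pvPop_spec h hw hg.1
    have hfe : pvMF bound (pvContent h) = pvMF bound (pvContent (heapPopState h)) := by
      rw [pvMF_perm bound _ _ hperm]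
      unfold pvMF
      rw [← Multiset.cons_coe, Multiset.filter_cons_of_neg _ (by exact not_le.2 hlt)]
    obtain ⟨extra, he1, he2, he3, he4, he5⟩ := ih hw' hv2
    rw [pyExtract.eq_def]
    simp only [dif_pos hg, if_pos hlt]
    exact ⟨extra, he1, he2, by rw [hfe]; exact he3, by rw [hfe]; exact he4,
      by rw [hfe]; exact he5⟩
  · -- valid root: popped and collected
    intro h valid hg val hge ih hw hv2
    simp only [val] at hge ih
    obtain ⟨hw', hn', hperm⟩ := pvPop_spec h hw hg.1
    have hval : bound ≤ (h.t.getD 1 pvDefault).2 := not_lt.1 hge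
    have hfe : pvMF bound (pvContent h) =
        (h.t.getD 1 pvDefault) ::ₘ pvMF bound (pvContent (heapPopState h)) := by
      rw [pvMF_perm bound _ _ hperm]
      unfold pvMF
      rw [← Multiset.cons_coe, Multiset.filter_cons_of_pos (p := fun x : Int × Int => bound ≤ x.2) _ hval]
    obtain ⟨extra, he1, he2, he3, he4, he5⟩ := ih hw' (by simp; omega)
    rw [pyExtract.eq_def]
    simp only [dif_pos hg, if_neg hge]
    refine ⟨(h.t.getD 1 pvDefault) :: extra, ?_, he2, ?_, ?_, ?_⟩
    · rw [he1]
      simp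
    · rw [hfe, he3, ← Multiset.cons_coe, Multiset.cons_add]
    · rw [hfe]
      refine ⟨Multiset.mem_cons_self _ _, ?_, ?_⟩
      · intro x hx
        have hx' : x ∈ pvContent h := by
          have hm := Multiset.mem_filter.1 (hfe ▸ hx)
          exact hm.1
        exact pvRoot_max h hw x hx'
      · rw [Multiset.erase_cons_head]
        exact he4
    · rw [hfe]
      simp only [Multiset.card_cons, List.length_append, List.length_cons,
        List.length_nil] at he5 ⊢
      omega
  · -- loop exit: heap empty or two elements collected
    intro h valid hg hw hv2
    rw [pyExtract.eq_def]
    simp only [dif_neg hg]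
    refine ⟨[], by simp, hw, by simp, trivial, ?_⟩
    rcases not_and_or.1 hg with hn | hl
    · have hc : pvContent h = [] := pvContent_nil h hw (not_not.1 hn)
      rw [hc]
      simp [pvMF]
      omega
    · have hv : valid.length = 2 := by omega
      simp [hv]

theorem pvReinsert_spec (l : List (Int × Int)) (h : PyHeap) (hw : pvWF h) :
    pvWF (l.foldl (fun h v => heapInsert h v) h) ∧
    (↑(pvContent (l.foldl (fun h v => heapInsert h v) h)) : Multiset (Int × Int)) =
      ↑(pvContent h) + ↑l := by
  induction l generalizing h with
  | nil => exact ⟨hw, by simp⟩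
  | cons v tl ih =>
    obtain ⟨hw2, heq⟩ := ih (heapInsert h v) (pvInsert_WF h v hw)
    refine ⟨hw2, ?_⟩
    simp only [List.foldl_cons] at *
    rw [heq, Multiset.coe_eq_coe.2 (pvInsert_content h v hw), Multiset.coe_add,
      Multiset.coe_add]
    rw [List.append_assoc]
    rfl

-- ---------- the B-side partial folds ----------

-- one outer step of B (the scan over pairs ending at b)
def pvBStep (wiek : List Int) (k : Int) (best : Int) (b : Nat) : Int :=
  (PySem.List.pyRange (max 0 ((b : Int) - k)) (b : Int) 1).foldl (fun (best : Int) (a : Int) =>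
      let s := wiek.getD a.toNat 0 + wiek.getD b 0
      if s > best then s else best) best

-- B's value after the first m outer iterations
def pvBP (wiek : List Int) (k : Int) (m : Nat) : Int :=
  (List.range m).foldl (pvBStep wiek k) 0

theorem pvAlt_eq (wiek : List Int) (k : Int) :
    maks_suma_wiekow_with_heap_alt wiek k = pvBP wiek k wiek.length := rfl

-- one step of A's main loop (definitionally the lambda of the port of A)
def pvAStep (wiek : List Int) (k : Int) (st : PyHeap × Int) (i : Nat) : PyHeap × Int :=
  let h1 := heapInsert st.1 (wiek.getD i 0, (i : Int))
  let h2 := pyPurge h1 ((i : Int) - k)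
  if 1 ≤ i then
    let ex := pyExtract h2 ((i : Int) - k) []
    let ms := if ex.1.length = 2 then
        max st.2 ((ex.1.getD 0 pvDefault).1 + (ex.1.getD 1 pvDefault).1)
      else st.2
    (ex.1.foldl (fun h v => heapInsert h v) ex.2, ms)
  else (h2, st.2)

theorem pvA_eq (wiek : List Int) (k : Int) :
    maks_suma_wiekow_with_heap wiek k =
      ((List.range wiek.length).foldl (pvAStep wiek k) (⟨[pvDefault], 0⟩, 0)).2 := rfl

-- ---------- running-maximum folds ----------

theorem pvFoldMax_ge_init (g : Int → Int) (l : List Int) (init : Int) :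
    init ≤ l.foldl (fun (best : Int) (a : Int) =>
      let s := g a
      if s > best then s else best) init := by
  induction l generalizing init with
  | nil => exact le_refl _
  | cons a tl ih =>
    refine le_trans ?_ (ih (if g a > init then g a else init))
    split <;> omega

theorem pvFoldMax_ge_mem (g : Int → Int) (l : List Int) (init : Int) (a : Int) (ha : a ∈ l) :
    g a ≤ l.foldl (fun (best : Int) (a : Int) =>
      let s := g a
      if s > best then s else best) init := by
  induction l generalizing init with
  | nil => cases ha
  | cons x tl ih =>
    rcases List.mem_cons.1 ha with h | h
    · subst h
      refine le_trans ?_ (pvFoldMax_ge_init g tl _)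
      simp only [List.foldl_cons]
      split <;> omega
    · exact ih _ h

theorem pvFoldMax_le (g : Int → Int) (l : List Int) (init c : Int) (h0 : init ≤ c)
    (hc : ∀ a ∈ l, g a ≤ c) :
    l.foldl (fun (best : Int) (a : Int) =>
      let s := g a
      if s > best then s else best) init ≤ c := by
  induction l generalizing init with
  | nil => exact h0
  | cons x tl ih =>
    simp only [List.foldl_cons]
    apply ih
    · have hx := hc x List.mem_cons_self
      split <;> omega
    · intro a ha
      exact hc a (List.mem_cons_of_mem _ ha)

theorem pvBP_zero (wiek : List Int) (k : Int) : pvBP wiek k 0 = 0 := rfl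

theorem pvBP_succ (wiek : List Int) (k : Int) (m : Nat) :
    pvBP wiek k (m + 1) = pvBStep wiek k (pvBP wiek k m) m := by
  unfold pvBP
  rw [List.range_succ, List.foldl_append]
  rfl

theorem pvBStep_ge (wiek : List Int) (k : Int) (best : Int) (b : Nat) :
    best ≤ pvBStep wiek k best b := pvFoldMax_ge_init _ _ _

theorem pvBP_mono (wiek : List Int) (k : Int) (m m' : Nat) (h : m ≤ m') :
    pvBP wiek k m ≤ pvBP wiek k m' := by
  induction m' with
  | zero => rw [Nat.le_zero.1 h]
  | succ m' ih =>
    rcases Nat.lt_or_ge m (m' + 1) with h' | h'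
    · exact le_trans (ih (by omega)) (by rw [pvBP_succ]; exact pvBStep_ge _ _ _ _)
    · rw [(by omega : m = m' + 1)]

theorem pvBP_pair (wiek : List Int) (k : Int) (a b m : Nat) (hab : a < b) (hbm : b < m)
    (hk : (b : Int) - k ≤ (a : Int)) :
    wiek.getD a 0 + wiek.getD b 0 ≤ pvBP wiek k m := by
  have hmem : ((a : Nat) : Int) ∈ PySem.List.pyRange (max 0 ((b : Int) - k)) (b : Int) 1 := by
    rw [PySem.List.mem_pyRange_one]
    constructor
    · exact max_le (Int.natCast_nonneg a) hk
    · exact_mod_cast hab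
  have h1 : wiek.getD a 0 + wiek.getD b 0 ≤ pvBStep wiek k (pvBP wiek k b) b := by
    have h2 := pvFoldMax_ge_mem (fun x : Int => wiek.getD x.toNat 0 + wiek.getD b 0)
      (PySem.List.pyRange (max 0 ((b : Int) - k)) (b : Int) 1) (pvBP wiek k b)
      ((a : Nat) : Int) hmem
    simpa using h2
  refine le_trans (le_trans h1 (le_of_eq (pvBP_succ wiek k b).symm)) ?_
  exact pvBP_mono wiek k (b + 1) m (by omega)

-- ---------- the sliding window ----------

-- the indices inside the window ending at i
def pvWIdx (k : Int) (i : Nat) : List Nat :=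
  (List.range (i + 1)).filter (fun j => decide ((i : Int) - k ≤ (j : Int)))

def pvF (wiek : List Int) : Nat → Int × Int := fun j => (wiek.getD j 0, (j : Int))

-- the window's elements, as A's heap stores them
def pvWin (wiek : List Int) (k : Int) (i : Nat) : Multiset (Int × Int) :=
  ↑((pvWIdx k i).map (pvF wiek))

theorem pvWIdx_mem (k : Int) (i j : Nat) :
    j ∈ pvWIdx k i ↔ j ≤ i ∧ (i : Int) - k ≤ (j : Int) := by
  simp only [pvWIdx, List.mem_filter, List.mem_range, decide_eq_true_eq]
  omega

theorem pvWIdx_nodup (k : Int) (i : Nat) : (pvWIdx k i).Nodup :=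
  (List.nodup_range).filter _

theorem pvWIdx_two (k : Int) (i : Nat) (hk : 1 ≤ k) (hi : 1 ≤ i) :
    2 ≤ (pvWIdx k i).length := by
  have h1 : i - 1 ∈ pvWIdx k i := by rw [pvWIdx_mem]; omega
  have h2 : i ∈ pvWIdx k i := by rw [pvWIdx_mem]; omega
  rcases hl : pvWIdx k i with _ | ⟨x, _ | ⟨y, t⟩⟩
  · rw [hl] at h1; cases h1
  · rw [hl] at h1 h2
    have e1 := List.mem_singleton.1 h1
    have e2 := List.mem_singleton.1 h2
    omega
  · simp

-- ---------- window bookkeeping ----------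

theorem pvWIdx_step (k : Int) (i : Nat) (hi : 1 ≤ i) :
    pvWIdx k i =
      (pvWIdx k (i - 1)).filter (fun j : Nat => decide ((i : Int) - k ≤ (j : Int))) ++
        (if (0 : Int) ≤ k then ([i] : List Nat) else []) := by
  unfold pvWIdx
  rw [List.range_succ, List.filter_append, (by omega : i - 1 + 1 = i)]
  congr 1
  · rw [List.filter_filter]
    refine List.filter_congr ?_
    intro j hj
    have hji : j < i := List.mem_range.1 hj
    by_cases hq : (i : Int) - k ≤ (j : Int)
    · have hq' : (i : Int) - 1 - k ≤ (j : Int) := by omega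
      simp [hq, hq']
      omega
    · simp [hq]
  · have hiff : ((i : Int) - k ≤ (i : Int)) = ((0 : Int) ≤ k) := by
      apply propext
      omega
    simp only [List.filter_cons, List.filter_nil, hiff]
    split <;> simp_all

theorem pvWin_step (wiek : List Int) (k : Int) (i : Nat) (hi : 1 ≤ i) :
    Multiset.filter (fun x => (i : Int) - k ≤ x.2) (pvWin wiek k (i - 1)) +
      (if (0 : Int) ≤ k then {pvF wiek i} else 0) = pvWin wiek k i := by
  unfold pvWin
  rw [pvWIdx_step k i hi, List.map_append, ← Multiset.coe_add]
  congr 1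
  · rw [Multiset.filter_coe, List.filter_map]
    rfl
  · split <;> simp

theorem pvWin_zero (wiek : List Int) (k : Int) :
    pvWin wiek k 0 = if (0 : Int) ≤ k then {pvF wiek 0} else 0 := by
  unfold pvWin pvWIdx
  by_cases hk : (0 : Int) ≤ k
  · have hd : decide (((0 : Nat) : Int) - k ≤ ((0 : Nat) : Int)) = true := by
      simp
      omega
    simp [List.range_one, List.filter_cons, hd, hk]
  · have hd : decide (((0 : Nat) : Int) - k ≤ ((0 : Nat) : Int)) = false := by
      simp
      omega
    simp [List.range_one, List.filter_cons, hd, hk]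

theorem pvWin_card (wiek : List Int) (k : Int) (i : Nat) :
    Multiset.card (pvWin wiek k i) = (pvWIdx k i).length := by simp [pvWin]

theorem pvWIdx_short (k : Int) (i : Nat) (hi : 1 ≤ i) (hlen : (pvWIdx k i).length ≤ 1) :
    k ≤ 0 := by
  by_contra hk
  have := pvWIdx_two k i (by omega) hi
  omega

theorem pvWin_erase (wiek : List Int) (k : Int) (i : Nat) (j : Nat) (hj : j ∈ pvWIdx k i) :
    (pvWin wiek k i).erase (pvF wiek j) = ↑(((pvWIdx k i).erase j).map (pvF wiek)) := by
  have hperm : (pvWIdx k i).Perm (j :: (pvWIdx k i).erase j) := List.perm_cons_erase hj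
  unfold pvWin
  rw [Multiset.coe_eq_coe.2 (hperm.map (pvF wiek))]
  show   ((pvF wiek j ::ₘ ↑(((pvWIdx k i).erase j).map (pvF wiek))) : Multiset _).erase _ = _
  rw [Multiset.erase_cons_head]

theorem pvWin_pair (wiek : List Int) (k : Int) (i : Nat) (ja jb : Nat)
    (hja : ja ∈ pvWIdx k i) (hjb : jb ∈ pvWIdx k i) (hne : jb ≠ ja) :
    pvF wiek ja ∈ pvWin wiek k i ∧
    pvF wiek jb ∈ (pvWin wiek k i).erase (pvF wiek ja) := by
  constructor
  · show pvF wiek ja ∈ ↑((pvWIdx k i).map (pvF wiek))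
    exact List.mem_map_of_mem hja
  · rw [pvWin_erase wiek k i ja hja]
    show pvF wiek jb ∈ ((pvWIdx k i).erase ja).map (pvF wiek)
    refine List.mem_map_of_mem ?_
    exact ((pvWIdx_nodup k i).mem_erase_iff).2 ⟨hne, hjb⟩

theorem pvGreedy_pair_le (W : Multiset (Int × Int)) (a b : Int × Int)
    (hg : GreedyMax W [a, b]) (x y : Int × Int) (hx : x ∈ W) (hy : y ∈ W.erase x) :
    x.1 + y.1 ≤ a.1 + b.1 := by
  obtain ⟨haW, hamax, hbW, hbmax, -⟩ := hg
  by_cases hxa : x = a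
  · subst hxa
    exact add_le_add (hamax x hx) (hbmax y hy)
  · have hx' : x ∈ W.erase a := (Multiset.mem_erase_of_ne hxa).2 hx
    have hy' : y ∈ W := Multiset.mem_of_mem_erase hy
    have h1 := hbmax x hx'
    have h2 := hamax y hy'
    omega

-- ---------- the main loop invariant ----------

def pvInv (wiek : List Int) (k : Int) (m : Nat) (st : PyHeap × Int) : Prop :=
  pvWF st.1 ∧ st.2 = pvBP wiek k m ∧
  (m = 0 → pvContent st.1 = []) ∧
  (1 ≤ m → pvMF ((m : Int) - 1 - k) (pvContent st.1) = pvWin wiek k (m - 1))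

theorem pvBStep_nil (wiek : List Int) (k best : Int) (b : Nat)
    (h : (b : Int) ≤ max 0 ((b : Int) - k)) : pvBStep wiek k best b = best := by
  unfold pvBStep
  rw [PySem.List.pyRange_one_eq_nil h]
  rfl

theorem pvBP_one (wiek : List Int) (k : Int) : pvBP wiek k 1 = 0 := by
  rw [pvBP_succ, pvBP_zero]
  exact pvBStep_nil wiek k 0 0 (by simp)

theorem pvFilter_single (wiek : List Int) (k : Int) (m : Nat) :
    Multiset.filter (fun x : Int × Int => (m : Int) - k ≤ x.2) ↑[pvF wiek m] =
      (if (0 : Int) ≤ k then ({pvF wiek m} : Multiset (Int × Int)) else 0) := by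
  have hc : ((pvF wiek m).2 = (m : Int)) := rfl
  by_cases hk : (0 : Int) ≤ k
  · rw [if_pos hk]
    have hmk : ((m : Int) - k ≤ (pvF wiek m).2) := by rw [hc]; omega
    simp [Multiset.filter_singleton, hmk]
    rw [hc]
    omega
  · rw [if_neg hk]
    have hmk : ¬ ((m : Int) - k ≤ (pvF wiek m).2) := by rw [hc]; omega
    simp [Multiset.filter_singleton, hmk]
    rw [hc]
    omega

theorem pvWin_mem (wiek : List Int) (k : Int) (i : Nat) (x : Int × Int)
    (hx : x ∈ pvWin wiek k i) : ∃ j, j ∈ pvWIdx k i ∧ x = pvF wiek j := by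
  obtain ⟨j, hj, he⟩ := List.mem_map.1 (Multiset.mem_coe.1 hx)
  exact ⟨j, hj, he.symm⟩

theorem pvStep (wiek : List Int) (k : Int) (m : Nat) (st : PyHeap × Int)
    (hInv : pvInv wiek k m st) : pvInv wiek k (m + 1) (pvAStep wiek k st m) := by
  obtain ⟨hWF, hms, h0, h1⟩ := hInv
  have hWF1 : pvWF (heapInsert st.1 (wiek.getD m 0, (m : Int))) := pvInsert_WF _ _ hWF
  have hC1 : (pvContent (heapInsert st.1 (wiek.getD m 0, (m : Int)))).Perm
      (pvContent st.1 ++ [pvF wiek m]) := pvInsert_content _ _ hWF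
  obtain ⟨hWF2, hMF2⟩ :=
    pvPurge_spec (heapInsert st.1 (wiek.getD m 0, (m : Int))) ((m : Int) - k) hWF1
  have hbe : ((m + 1 : Nat) : Int) - 1 - k = (m : Int) - k := by push_cast; ring
  have hC : pvMF ((m : Int) - k)
      (pvContent (pyPurge (heapInsert st.1 (wiek.getD m 0, (m : Int))) ((m : Int) - k))) =
      pvWin wiek k m := by
    rw [hMF2, pvMF_perm _ _ _ hC1]
    unfold pvMF
    rw [← Multiset.coe_add, Multiset.filter_add]
    rcases Nat.eq_zero_or_pos m with hm | hm
    · subst hm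
      rw [h0 rfl]
      simp only [Multiset.coe_nil, Multiset.filter_zero, zero_add]
      rw [pvFilter_single, pvWin_zero]
    · have hfl : Multiset.filter (fun x : Int × Int => (m : Int) - k ≤ x.2)
          ↑(pvContent st.1) = Multiset.filter (fun x : Int × Int => (m : Int) - k ≤ x.2)
          (pvWin wiek k (m - 1)) := by
        have hsub : Multiset.filter (fun x : Int × Int => (m : Int) - k ≤ x.2)
            ↑(pvContent st.1) = Multiset.filter (fun x : Int × Int => (m : Int) - k ≤ x.2)
            (Multiset.filter (fun x : Int × Int => (m : Int) - 1 - k ≤ x.2)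
              ↑(pvContent st.1)) := by
          rw [Multiset.filter_filter]
          refine Multiset.filter_congr ?_
          intro x _
          constructor
          · intro hx
            exact ⟨hx, by omega⟩
          · intro hx
            exact hx.1
        have h1' := h1 hm
        unfold pvMF at h1'
        rw [hsub, h1']
      rw [hfl, pvFilter_single]
      exact pvWin_step wiek k m hm
  by_cases him : 1 ≤ m
  · -- the extraction step
    have hEX := pvExtract_spec
      (pyPurge (heapInsert st.1 (wiek.getD m 0, (m : Int))) ((m : Int) - k))
      ((m : Int) - k) [] hWF2 (by simp)
    obtain ⟨extra, he1, he2, he3, he4, he5⟩ := hEX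
    rw [List.nil_append] at he1
    rw [hC] at he3 he4 he5
    simp only [List.nil_append, List.length_nil, Nat.zero_add] at he5
    have hextraP : ∀ x ∈ extra, ((m : Int) - k ≤ x.2) := by
      intro x hx
      have hxW : x ∈ pvWin wiek k m := by
        rw [he3]
        exact Multiset.mem_add.2 (Or.inl (by exact_mod_cast hx))
      obtain ⟨j, hj, hxj⟩ := pvWin_mem wiek k m x hxW
      rw [hxj]
      exact ((pvWIdx_mem k m j).1 hj).2
    obtain ⟨hWFr, hCr⟩ := pvReinsert_spec
      (pyExtract (pyPurge (heapInsert st.1 (wiek.getD m 0, (m : Int))) ((m : Int) - k))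
        ((m : Int) - k) []).1 _ he2
    -- the re-inserted heap again holds exactly the window among valid elements
    have hMFnew : pvMF ((m : Int) - k)
        (pvContent ((pyExtract (pyPurge (heapInsert st.1 (wiek.getD m 0, (m : Int)))
          ((m : Int) - k)) ((m : Int) - k) []).1.foldl (fun h v => heapInsert h v)
          (pyExtract (pyPurge (heapInsert st.1 (wiek.getD m 0, (m : Int)))
          ((m : Int) - k)) ((m : Int) - k) []).2)) = pvWin wiek k m := by
      unfold pvMF
      rw [hCr, Multiset.filter_add, he1]
      have hfx : Multiset.filter (fun x : Int × Int => (m : Int) - k ≤ x.2) ↑extra =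
          ↑extra := Multiset.filter_eq_self.2 (by exact_mod_cast hextraP)
      rw [hfx, add_comm]
      exact he3.symm
    simp only [pvAStep]
    rw [if_pos him]
    refine ⟨hWFr, ?_, by omega, ?_⟩
    · -- the accumulated maximum equals B's partial fold
      show (if (pyExtract (pyPurge (heapInsert st.1 (wiek.getD m 0, (m : Int)))
          ((m : Int) - k)) ((m : Int) - k) []).1.length = 2 then _ else _) =
          pvBP wiek k (m + 1)
      rw [he1, hms]
      rw [pvWin_card] at he5
      by_cases hc2 : 2 ≤ (pvWIdx k m).length
      · -- a genuine two-element window: A records the top-two sum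
        have hlen2 : extra.length = 2 := by omega
        rw [if_pos hlen2]
        rcases extra with _ | ⟨a, _ | ⟨b, _ | ⟨c, t⟩⟩⟩ <;> simp only [List.length_nil,
          List.length_cons] at hlen2 <;> try omega
        obtain ⟨hga, hgmax, hgb, hgbmax, -⟩ := he4
        obtain ⟨ja, hja, haj⟩ := pvWin_mem wiek k m a hga
        have hb' : b ∈ ((pvWIdx k m).erase ja).map (pvF wiek) := by
          have hbb := hgb
          rw [haj, pvWin_erase wiek k m ja hja] at hbb
          exact_mod_cast hbb
        obtain ⟨jb, hjb', hbj⟩ := List.mem_map.1 hb'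
        obtain ⟨hjbne, hjbm⟩ := ((pvWIdx_nodup k m).mem_erase_iff).1 hjb'
        obtain ⟨hjam, hjak⟩ := (pvWIdx_mem k m ja).1 hja
        obtain ⟨hjbm', hjbk⟩ := (pvWIdx_mem k m jb).1 hjbm
        have hsum : a.1 + b.1 = wiek.getD ja 0 + wiek.getD jb 0 := by
          rw [haj, ← hbj]
          rfl
        have hle1 : a.1 + b.1 ≤ pvBP wiek k (m + 1) := by
          rcases Nat.lt_or_ge ja jb with hlt | hge
          · rw [hsum]
            exact pvBP_pair wiek k ja jb (m + 1) hlt (by omega) (by omega)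
          · have hlt : jb < ja := by omega
            rw [hsum, add_comm]
            exact pvBP_pair wiek k jb ja (m + 1) hlt (by omega) (by omega)
        have hle2 : pvBP wiek k (m + 1) ≤ max (pvBP wiek k m) (a.1 + b.1) := by
          rw [pvBP_succ]
          refine pvFoldMax_le (fun x : Int => wiek.getD x.toNat 0 + wiek.getD m 0) _ _ _
            (le_max_left _ _) ?_
          intro a' ha'
          rw [PySem.List.mem_pyRange_one] at ha'
          have ha0 : (0 : Int) ≤ a' := le_trans (le_max_left 0 _) ha'.1
          have hamk : (m : Int) - k ≤ a' := le_trans (le_max_right 0 _) ha'.1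
          have ham : a' < (m : Int) := ha'.2
          have hj'c : ((a'.toNat : Nat) : Int) = a' := Int.toNat_of_nonneg ha0
          have hj'mem : a'.toNat ∈ pvWIdx k m := (pvWIdx_mem k m a'.toNat).2 (by omega)
          have hmmem : m ∈ pvWIdx k m := (pvWIdx_mem k m m).2 (by omega)
          have hpair := pvWin_pair wiek k m a'.toNat m hj'mem hmmem (by omega)
          have hgle := pvGreedy_pair_le (pvWin wiek k m) a b
            ⟨hga, hgmax, hgb, hgbmax, trivial⟩ _ _ hpair.1 hpair.2
          exact le_trans hgle (le_max_right _ _)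
        have hmax : max (pvBP wiek k m) (a.1 + b.1) = pvBP wiek k (m + 1) :=
          le_antisymm (max_le (pvBP_mono wiek k m (m + 1) (by omega)) hle1) hle2
        simpa using hmax
      · have hlen2 : extra.length ≠ 2 := by omega
        rw [if_neg hlen2]
        have hk0 : k ≤ 0 := pvWIdx_short k m him (by omega)
        rw [pvBP_succ]
        exact (pvBStep_nil wiek k _ m (by
          refine le_max_of_le_right ?_
          omega)).symm
    · intro _
      rw [hbe, (by omega : m + 1 - 1 = m)]
      exact hMFnew
  · -- m = 0: A only inserts, B's first outer iteration scans nothing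
    have hm0 : m = 0 := by omega
    simp only [pvAStep]
    rw [if_neg him]
    refine ⟨hWF2, ?_, by omega, ?_⟩
    · show st.2 = pvBP wiek k (m + 1)
      rw [hms, hm0, pvBP_zero, pvBP_one]
    · intro _
      rw [hbe, (by omega : m + 1 - 1 = m)]
      exact hC

theorem pvLoop (wiek : List Int) (k : Int) (m : Nat) :
    pvInv wiek k m ((List.range m).foldl (pvAStep wiek k) (⟨[pvDefault], 0⟩, 0)) := by
  induction m with
  | zero =>
    simp only [List.range_zero, List.foldl_nil]
    refine ⟨⟨rfl, ?_⟩, rfl, fun _ => rfl, fun h => absurd h (by omega)⟩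
    intro j hj2 hj0
    simp only [] at hj0
    omega
  | succ m ih =>
    rw [List.range_succ, List.foldl_append, List.foldl_cons, List.foldl_nil]
    exact pvStep wiek k m _ ih

-- ===== VERDICT (by name: the statement is the Claim_ definition above) =====
theorem maks_suma_wiekow_with_heap_spec : Claim_equal_maks_suma_wiekow_with_heap := by
  intro wiek k _
  unfold Spec_maks_suma_wiekow_with_heap
  rw [pvA_eq, pvAlt_eq]
  exact (pvLoop wiek k wiek.length).2.1
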